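-- pv_equiv track=rewrite | github.com/FushengTianQing/ZhC | src/zhc/coverage/instrument.py | _add_instrumentation
-- ===== SOURCE A (Python) =====
-- from typing import Dict, List, Optional, Set, Tuple
--
-- def _add_instrumentation(
--     source: str, file_path: str, executable_lines: Set[int]
-- ) -> str:
--     """添加插桩代码"""
--     lines = source.split("\n")
--     result = []
--
--     # 预处理：找出所有需要插桩的位置
--     instrumentation_lines: List[Tuple[int, str]] = []
--
--     # 预处理：找出所有需要插桩的位置
--     for line_num in sorted(executable_lines):
--         if line_num > 0 and line_num <= len(lines):
--             instrumentation_lines.append(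
--                 (line_num, f'_zhc_coverage_hit_line("{file_path}", {line_num});')
--             )
--
--     # 插入插桩代码
--     insert_index = 0
--     for line_num, code in instrumentation_lines:
--         while insert_index < len(lines):
--             # 计算当前行号
--             current_line_num = insert_index + 1
--
--             # 找到需要插入的位置
--             if current_line_num < line_num:
--                 result.append(lines[insert_index])
--                 insert_index += 1
--             elif current_line_num == line_num:
--                 # 在这一行后添加插桩
--                 result.append(lines[insert_index])
--
--                 # 检查是否是语句结尾（以分号或花括号结尾）
--                 stripped = lines[insert_index].rstrip()
--                 if (
--                     stripped.endswith(";")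
--                     or stripped.endswith("{")
--                     or stripped.endswith("}")
--                 ):
--                     # 在行末添加注释
--                     result[-1] = (
--                         lines[insert_index].rstrip() + f" // COVERAGE: {code}"
--                     )
--                 else:
--                     result.append(f"    {code}")
--
--                 insert_index += 1
--                 break
--             else:
--                 break
--
--     # 添加剩余行
--     while insert_index < len(lines):
--         result.append(lines[insert_index])
--         insert_index += 1
--
--     return "\n".join(result)
-- ===== SOURCE B (Python) =====
-- def _add_instrumentation(source, file_path, executable_lines):
--     """Single pass over the lines with a membership test; no sorted merge walk."""
--     out = []
--     for i, line in enumerate(source.split("\n")):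
--         n = i + 1
--         if n in executable_lines:
--             code = f'_zhc_coverage_hit_line("{file_path}", {n});'
--             stripped = line.rstrip()
--             if stripped.endswith((";", "{", "}")):
--                 out.append(stripped + f" // COVERAGE: {code}")
--             else:
--                 out.append(line)
--                 out.append(f"    {code}")
--         else:
--             out.append(line)
--     return "\n".join(out)
-- ===== Notes on version B (the rewrite author's own statement) =====
-- stated objective: simpler
-- what changed: Replaced the pre-sorted instrumentation list and its merge-style insert_index walk (outer for over sorted targets + inner while copying lines + trailing while) by one enumerate pass over the lines with a membership test per line; the sort, the in-range pre-filter and both while loops disappear.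
import Mathlib
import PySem

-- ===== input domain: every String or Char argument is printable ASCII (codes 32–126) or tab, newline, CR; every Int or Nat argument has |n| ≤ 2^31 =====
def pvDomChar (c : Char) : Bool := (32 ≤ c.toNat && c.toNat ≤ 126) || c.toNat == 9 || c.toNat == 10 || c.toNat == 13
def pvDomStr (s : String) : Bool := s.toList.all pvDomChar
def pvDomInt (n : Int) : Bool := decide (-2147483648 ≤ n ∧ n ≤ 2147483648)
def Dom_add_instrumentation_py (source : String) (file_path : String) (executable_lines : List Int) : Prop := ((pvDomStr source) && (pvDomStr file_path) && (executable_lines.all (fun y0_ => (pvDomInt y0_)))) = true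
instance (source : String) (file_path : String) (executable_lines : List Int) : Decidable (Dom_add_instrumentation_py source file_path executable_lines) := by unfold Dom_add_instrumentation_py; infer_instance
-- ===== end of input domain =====

-- B replaces A's sorted-targets merge walk by a single enumerate pass with a membership test (objective: simpler).

-- f'_zhc_coverage_hit_line("{file_path}", {n});'  (the identical f-string of both Pythons)
def pvHitCode (file_path : String) (n : Int) : String :=
  "_zhc_coverage_hit_line(\"" ++ file_path ++ "\", " ++ PySem.Int.toStr n ++ ");"

-- ===== PORT A =====
-- the inner 'while insert_index < len(lines)' loop of A; state (insert_index, result)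
def pvInnerA (lines : List String) (line_num : Int) (code : String) (idx : Nat) (result : List String) : Nat × List String :=
  if h : idx < lines.length then
    let cur : Int := (idx : Int) + 1
    if cur < line_num then
      pvInnerA lines line_num code (idx + 1) (result ++ [lines[idx]])
    else if cur = line_num then
      let stripped := PySem.Str.rstrip lines[idx]
      let r1 := result ++ [lines[idx]]
      if PySem.Str.endswith stripped ";" || PySem.Str.endswith stripped "{" || PySem.Str.endswith stripped "}" then
        -- result[-1] = lines[insert_index].rstrip() + f" // COVERAGE: {code}"
        (idx + 1, r1.set (r1.length - 1) (stripped ++ " // COVERAGE: " ++ code))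
      else
        (idx + 1, r1 ++ ["    " ++ code])
    else
      (idx, result)
  else
    (idx, result)
termination_by lines.length - idx

-- the trailing 'while insert_index < len(lines)' loop of A
def pvTailA (lines : List String) (idx : Nat) (result : List String) : List String :=
  if h : idx < lines.length then
    pvTailA lines (idx + 1) (result ++ [lines[idx]])
  else
    result
termination_by lines.length - idx

def add_instrumentation_py (source : String) (file_path : String) (executable_lines : List Int) : String :=
  -- source.split("\n"): sep is the nonempty literal "\n", so split? is always some and .getD [] never fires
  let lines := (PySem.Str.split? source "\n").getD []
  let instrumentation_lines : List (Int × String) :=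
    (PySem.List.sorted (PySem.Set.ofList executable_lines) (fun x => x) false).foldl
      (fun acc line_num =>
        if decide (0 < line_num) && decide (line_num ≤ (lines.length : Int)) then
          acc ++ [(line_num, pvHitCode file_path line_num)]
        else acc) []
  let st := instrumentation_lines.foldl
      (fun (st : Nat × List String) p => pvInnerA lines p.1 p.2 st.1 st.2) (0, [])
  PySem.Str.join "\n" (pvTailA lines st.1 st.2)

-- ===== PORT B =====
-- B's single 'for i, line in enumerate(lines)' loop, as structural recursion with the counter i
def pvGoB (file_path : String) (executable_lines : List Int) : List String → Nat → List String
  | [], _ => []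
  | line :: rest, i =>
    (if executable_lines.contains ((i : Int) + 1) then
       let code := pvHitCode file_path ((i : Int) + 1)
       let stripped := PySem.Str.rstrip line
       if PySem.Str.endswith stripped ";" || PySem.Str.endswith stripped "{" || PySem.Str.endswith stripped "}" then
         [stripped ++ " // COVERAGE: " ++ code]
       else
         [line, "    " ++ code]
     else [line]) ++ pvGoB file_path executable_lines rest (i + 1)

def add_instrumentation_py_alt (source : String) (file_path : String) (executable_lines : List Int) : String :=
  PySem.Str.join "\n" (pvGoB file_path executable_lines ((PySem.Str.split? source "\n").getD []) 0)

-- ===== PRECONDITION & SPEC =====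
def Spec_add_instrumentation_py (source : String) (file_path : String) (executable_lines : List Int) (out : String) : Prop := out = add_instrumentation_py_alt source file_path executable_lines
instance (source : String) (file_path : String) (executable_lines : List Int) (out : String) : Decidable (Spec_add_instrumentation_py source file_path executable_lines out) := by unfold Spec_add_instrumentation_py; infer_instance

-- ===== CLAIM (what is proved, stated in full; the proofs are below) =====
def Claim_equal_add_instrumentation_py : Prop := ∀ (source : String) (file_path : String) (executable_lines : List Int), Dom_add_instrumentation_py source file_path executable_lines → Spec_add_instrumentation_py source file_path executable_lines (add_instrumentation_py source file_path executable_lines)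

-- ===== LEMMAS AND PROOFS =====

theorem pvSet_append (res : List String) (a v : String) :
    (res ++ [a]).set res.length v = res ++ [v] := by
  induction res with
  | nil => rfl
  | cons x xs ih => simp [ih]

-- one step of pvTailA / pvInnerA below the target line
theorem pvTailA_step (lines : List String) (idx : Nat) (res : List String) (h : idx < lines.length) :
    pvTailA lines idx res = pvTailA lines (idx + 1) (res ++ [lines[idx]]) := by
  rw [pvTailA]; simp [h]

theorem pvTailA_stop (lines : List String) (idx : Nat) (res : List String) (h : ¬ idx < lines.length) :
    pvTailA lines idx res = res := by
  rw [pvTailA]; simp [h]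

theorem pvInnerA_skip (lines : List String) (n : Int) (code : String) (idx : Nat) (res : List String)
    (h : idx < lines.length) (hn : (idx : Int) + 1 < n) :
    pvInnerA lines n code idx res = pvInnerA lines n code (idx + 1) (res ++ [lines[idx]]) := by
  rw [pvInnerA]; simp [h, hn]

theorem pvInnerA_hit (lines : List String) (code : String) (idx : Nat) (res : List String)
    (h : idx < lines.length) :
    pvInnerA lines ((idx : Int) + 1) code idx res =
      (idx + 1,
        res ++
          (let stripped := PySem.Str.rstrip lines[idx]
           if PySem.Str.endswith stripped ";" || PySem.Str.endswith stripped "{" || PySem.Str.endswith stripped "}" then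
             [stripped ++ " // COVERAGE: " ++ code]
           else
             [lines[idx], "    " ++ code])) := by
  rw [pvInnerA]
  have hlt : ¬ ((idx : Int) + 1 < (idx : Int) + 1) := by omega
  simp only [dif_pos h, if_neg hlt, List.length_append, List.length_cons,
    List.length_nil, Nat.add_sub_cancel, pvSet_append]
  split_ifs <;> simp

-- A's state after the loops when every remaining target is out of reach (idx past the end)
theorem pvDone (lines : List String) (fp : String) (ex : List Int)
    (idx : Nat) (res : List String) (L : List (Int × String))
    (hlen : lines.length ≤ idx)
    (hmem : ∀ m : Int, m ∈ L.map Prod.fst ↔ (m ∈ ex ∧ (idx : Int) < m ∧ m ≤ (lines.length : Int))) :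
    (let st := L.foldl (fun (st : Nat × List String) p => pvInnerA lines p.1 p.2 st.1 st.2) (idx, res)
     pvTailA lines st.1 st.2) = res ++ pvGoB fp ex (lines.drop idx) idx := by
  have hL : L = [] := by
    cases L with
    | nil => rfl
    | cons p t =>
      have := (hmem p.1).mp (by simp)
      omega
  subst hL
  simp only [List.foldl_nil]
  rw [pvTailA_stop lines idx res (by omega), List.drop_eq_nil_of_le hlen]
  simp [pvGoB]

-- main invariant: running A's outer fold + trailing loop from idx, with L exactly the sorted
-- in-range targets above idx, produces B's single pass over the remaining lines
theorem pvMain (lines : List String) (fp : String) (ex : List Int) :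
    ∀ fuel idx res (L : List (Int × String)),
      lines.length - idx ≤ fuel →
      (L.map Prod.fst).Pairwise (· < ·) →
      (∀ p ∈ L, p.2 = pvHitCode fp p.1) →
      (∀ m : Int, m ∈ L.map Prod.fst ↔ (m ∈ ex ∧ (idx : Int) < m ∧ m ≤ (lines.length : Int))) →
      (let st := L.foldl (fun (st : Nat × List String) p => pvInnerA lines p.1 p.2 st.1 st.2) (idx, res)
       pvTailA lines st.1 st.2) = res ++ pvGoB fp ex (lines.drop idx) idx := by
  intro fuel
  induction fuel with
  | zero =>
    intro idx res L hfuel _ _ hmem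
    exact pvDone lines fp ex idx res L (by omega) hmem
  | succ fuel ih =>
    intro idx res L hfuel hpw hcode hmem
    by_cases hidx : idx < lines.length
    · have hdrop : lines.drop idx = lines[idx] :: lines.drop (idx + 1) :=
        List.drop_eq_getElem_cons hidx
      by_cases hin : ((idx : Int) + 1) ∈ ex
      · -- the next line is a target: L must start with (idx+1, its code)
        have hhead : ((idx : Int) + 1) ∈ L.map Prod.fst :=
          (hmem _).mpr ⟨hin, by omega, by exact_mod_cast hidx⟩
        cases L with
        | nil => simp at hhead
        | cons p t =>
          have hp1 : p.1 = (idx : Int) + 1 := by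
            rcases List.mem_map.mp hhead with ⟨q, hq, hqe⟩
            rcases List.mem_cons.mp hq with rfl | hqt
            · exact hqe
            · -- idx+1 also in the tail would contradict strict increase with p.1 > idx
              have hlt := (List.pairwise_cons.mp (by simpa using hpw)).1 q.1
                (List.mem_map_of_mem hqt)
              have h2 := (hmem p.1).mp (by simp)
              omega
          have hcodep : p.2 = pvHitCode fp ((idx : Int) + 1) := by
            rw [hcode p (by simp), hp1]
          simp only [List.foldl_cons]
          rw [hp1, hcodep, pvInnerA_hit lines _ idx res hidx]
          have htail := ih (idx + 1) (res ++
              (let stripped := PySem.Str.rstrip lines[idx]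
               if PySem.Str.endswith stripped ";" || PySem.Str.endswith stripped "{" || PySem.Str.endswith stripped "}" then
                 [stripped ++ " // COVERAGE: " ++ pvHitCode fp ((idx : Int) + 1)]
               else
                 [lines[idx], "    " ++ pvHitCode fp ((idx : Int) + 1)])) t (by omega)
            ((List.pairwise_cons.mp hpw).2)
            (fun q hq => hcode q (by simp [hq]))
            (by
              intro m
              constructor
              · intro hm
                have h1 := (hmem m).mp (by simp only [List.map_cons]; exact List.mem_cons_of_mem _ hm)
                have hlt := (List.pairwise_cons.mp (by simpa using hpw)).1 m hm
                exact ⟨h1.1, by omega, h1.2.2⟩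
              · rintro ⟨h1, h2, h3⟩
                have h4 := (hmem m).mpr ⟨h1, by omega, h3⟩
                rcases List.mem_map.mp h4 with ⟨q, hq, hqe⟩
                rcases List.mem_cons.mp hq with rfl | hqt
                · omega
                · exact hqe ▸ List.mem_map_of_mem hqt)
          rw [htail, hdrop]
          have hcont : ex.contains ((idx : Int) + 1) = true := by
            simp [hin]
          simp only [pvGoB, hcont, if_pos]
          simp
      · -- the next line is not a target
        have hcont : ex.contains ((idx : Int) + 1) = false := by
          simp [hin]
        have hgoal2 : res ++ pvGoB fp ex (lines.drop idx) idx
            = (res ++ [lines[idx]]) ++ pvGoB fp ex (lines.drop (idx + 1)) (idx + 1) := by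
          rw [hdrop]
          simp [pvGoB, hin]
        have hstep : ∀ q ∈ L, (idx : Int) + 1 < q.1 := by
          intro q hq
          have h1 := (hmem q.1).mp (List.mem_map_of_mem hq)
          rcases h1 with ⟨hq1, hq2, hq3⟩
          by_contra hle
          have heq : q.1 = (idx : Int) + 1 := by omega
          exact hin (heq ▸ hq1)
        have hmem' : ∀ m : Int, m ∈ L.map Prod.fst ↔ (m ∈ ex ∧ (((idx + 1 : Nat)) : Int) < m ∧ m ≤ (lines.length : Int)) := by
          intro m
          constructor
          · intro hm
            have h1 := (hmem m).mp hm
            rcases List.mem_map.mp hm with ⟨q, hq, hqm⟩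
            have := hstep q hq
            push_cast
            exact ⟨h1.1, by omega, h1.2.2⟩
          · rintro ⟨h1, h2, h3⟩
            exact (hmem m).mpr ⟨h1, by push_cast at h2 ⊢; omega, h3⟩
        cases L with
        | nil =>
          simp only [List.foldl_nil]
          rw [pvTailA_step lines idx res hidx, hgoal2]
          have := ih (idx + 1) (res ++ [lines[idx]]) [] (by omega) (by simp) (by simp)
            (by simpa using hmem')
          simpa using this
        | cons q t =>
          simp only [List.foldl_cons]
          rw [pvInnerA_skip lines q.1 q.2 idx res hidx (hstep q (by simp))]
          have := ih (idx + 1) (res ++ [lines[idx]]) (q :: t) (by omega) hpw hcode hmem'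
          simp only [List.foldl_cons] at this
          rw [this, hgoal2]
    · exact pvDone lines fp ex idx res L (by omega) hmem

-- A's instrumentation_lines list is the in-range filter of the sorted set, paired with its code
theorem pvInstrChar (fp : String) (ex : List Int) (len : Nat) :
    (PySem.List.sorted (PySem.Set.ofList ex) (fun x => x) false).foldl
      (fun acc line_num =>
        if decide (0 < line_num) && decide (line_num ≤ (len : Int)) then
          acc ++ [(line_num, pvHitCode fp line_num)]
        else acc) []
    = ((PySem.List.sorted (PySem.Set.ofList ex) (fun x => x) false).filter
        (fun n => decide (0 < n) && decide (n ≤ (len : Int)))).map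
        (fun n => (n, pvHitCode fp n)) := by
  simpa using PySem.List.foldl_append_if
    (fun n => decide (0 < n) && decide (n ≤ (len : Int)))
    (fun n => (n, pvHitCode fp n))
    (PySem.List.sorted (PySem.Set.ofList ex) (fun x => x) false) []

-- ===== VERDICT (by name: the statement is the Claim_ definition above) =====
theorem add_instrumentation_py_spec : Claim_equal_add_instrumentation_py := by
  intro source fp ex _
  unfold Spec_add_instrumentation_py add_instrumentation_py add_instrumentation_py_alt
  simp only
  set lines := (PySem.Str.split? source "\n").getD [] with hlines
  rw [pvInstrChar fp ex lines.length]
  set F := ((PySem.List.sorted (PySem.Set.ofList ex) (fun x => x) false).filter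
      (fun n => decide (0 < n) && decide (n ≤ (lines.length : Int)))) with hF
  have hfst : (F.map (fun n => (n, pvHitCode fp n))).map Prod.fst = F := by
    simp [List.map_map, Function.comp_def]
  have hpw : (F.map (fun n => (n, pvHitCode fp n))).map Prod.fst |>.Pairwise (· < ·) := by
    rw [hfst]
    exact List.Pairwise.filter _ (PySem.List.sorted_ofList_pairwise_lt ex)
  have hcode : ∀ p ∈ F.map (fun n => (n, pvHitCode fp n)), p.2 = pvHitCode fp p.1 := by
    intro p hp
    rcases List.mem_map.mp hp with ⟨n, _, rfl⟩
    rfl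
  have hmem : ∀ m : Int, m ∈ (F.map (fun n => (n, pvHitCode fp n))).map Prod.fst ↔
      (m ∈ ex ∧ ((0 : Nat) : Int) < m ∧ m ≤ (lines.length : Int)) := by
    intro m
    rw [hfst, hF, List.mem_filter]
    simp only [PySem.List.mem_sorted, PySem.Set.mem_ofList]
    constructor
    · rintro ⟨h1, h2⟩
      simp at h2
      exact ⟨h1, by push_cast; omega, h2.2⟩
    · rintro ⟨h1, h2, h3⟩
      refine ⟨h1, by simp; exact ⟨by push_cast at h2; omega, h3⟩⟩
  have := pvMain lines fp ex lines.length 0 [] (F.map (fun n => (n, pvHitCode fp n)))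
    (by omega) hpw hcode hmem
  rw [this]
  simp
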